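-- pv_equiv track=rewrite | github.com/cabrossman/python_algos | S) fb_int_prep/web4_balanced_split.py | balancedSplitExists
-- ===== SOURCE A (Python) =====
-- def balancedSplitExists(arr):
--     # Step 1: Sort the array & Init
--     arr.sort()
--     left, right = 0, len(arr) - 1
--     sum_left, sum_right = arr[left], arr[right]
--
--     while left < right - 1:  # We need a gap between the pointers
--         if sum_left < sum_right:
--             left += 1
--             sum_left += arr[left]
--         else:
--             right -= 1
--             sum_right += arr[right]
--     # Check if the sums are equal and the left pointer is pointing to a smaller element
--     return sum_left == sum_right and arr[left] < arr[right]
-- ===== SOURCE B (Python) =====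
-- def balancedSplitExists(arr):
--     # Sort in place (same observable mutation as the original), then test every
--     # split boundary with one forward prefix-sum scan.
--     arr.sort()
--     total = sum(arr)
--     prefix = 0
--     for i in range(len(arr) - 1):
--         prefix += arr[i]
--         if 2 * prefix == total and arr[i] < arr[i + 1]:
--             return True
--     return False
-- ===== Notes on version B (the rewrite author's own statement) =====
-- stated objective: simpler
-- what changed: Replaces the converging two-pointer sum-balancing walk over the sorted array with a single forward prefix-sum scan that directly tests every split boundary (2*prefix == total and strictly increasing neighbours).
-- intended difference: On nonempty arrays with negative total sum that nevertheless admit a balanced split (equal halves with max(left) < min(right), e.g. [-3,-2,-1]), A's two-pointer walk drifts past the unique valid boundary and returns False; B returns True, the intended answer, since the balanced split exists. — e.g. on balancedSplitExists([-3, -2, -1]): A returns false, B returns true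
import Mathlib
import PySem

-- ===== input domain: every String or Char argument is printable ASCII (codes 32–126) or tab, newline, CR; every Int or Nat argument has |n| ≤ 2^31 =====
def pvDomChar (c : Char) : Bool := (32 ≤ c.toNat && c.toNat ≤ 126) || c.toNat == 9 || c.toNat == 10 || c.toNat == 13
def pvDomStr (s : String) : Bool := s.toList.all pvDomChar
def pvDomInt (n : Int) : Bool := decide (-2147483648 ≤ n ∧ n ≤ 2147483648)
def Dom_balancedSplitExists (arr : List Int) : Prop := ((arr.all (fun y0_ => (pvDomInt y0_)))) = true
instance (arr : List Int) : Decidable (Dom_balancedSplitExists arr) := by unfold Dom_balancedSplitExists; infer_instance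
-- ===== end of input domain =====

-- B replaces A's two-pointer balancing with one forward prefix-sum scan over the sorted
-- array; both sort the argument in place in Python (same mutation), equivalence is about
-- the return value on nonempty inputs, with the stated intended difference D_ below.

-- ===== PORT A =====
-- while left < right - 1: move the pointer with the smaller running sum
def goA (s : List Int) : Nat → Nat → Nat → Int → Int → Nat × Nat × Int × Int
  | 0, l, r, sl, sr => (l, r, sl, sr)
  | fuel + 1, l, r, sl, sr =>
    if l + 1 < r then
      if sl < sr then goA s fuel (l + 1) r (sl + s.getD (l + 1) 0) sr
      else goA s fuel l (r - 1) sl (sr + s.getD (r - 1) 0)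
    else (l, r, sl, sr)

-- 'return sum_left == sum_right and arr[left] < arr[right]'
def pvCheck (s : List Int) (res : Nat × Nat × Int × Int) : Bool :=
  decide (res.2.2.1 = res.2.2.2) && decide (s.getD res.1 0 < s.getD res.2.1 0)

def balancedSplitExists (arr : List Int) : Bool :=
  let s := PySem.List.sorted arr (fun x => x) false
  let l := 0
  let r := s.length - 1
  pvCheck s (goA s s.length l r (s.getD l 0) (s.getD r 0))

-- ===== PORT B =====
-- for i in range(len(arr)-1): prefix += arr[i]; check the boundary after i
def goB (s : List Int) (total : Int) : Nat → Nat → Int → Bool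
  | 0, _, _ => false
  | fuel + 1, i, pre =>
    if i + 1 < s.length then
      let p := pre + s.getD i 0
      if 2 * p = total ∧ s.getD i 0 < s.getD (i + 1) 0 then true
      else goB s total fuel (i + 1) p
    else false

def balancedSplitExists_alt (arr : List Int) : Bool :=
  let s := PySem.List.sorted arr (fun x => x) false
  goB s s.sum s.length 0 0

-- ===== PRECONDITION & SPEC =====
-- Pre_ excludes only the empty list, on which A raises IndexError (arr[left] on []).
def Pre_balancedSplitExists (arr : List Int) : Prop := arr ≠ []
instance (arr : List Int) : Decidable (Pre_balancedSplitExists arr) := by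
  unfold Pre_balancedSplitExists; infer_instance

def pvWitness_balancedSplitExists : List Int := [1, 1, 2]

-- On nonempty arrays with negative total sum that nevertheless admit a balanced split
-- (equal-sum halves with max(left) < min(right), e.g. [-3,-2,-1]), A's two-pointer walk
-- drifts past the unique valid boundary and returns False; B returns True, the intended
-- answer, since the balanced split exists.
def D_balancedSplitExists (arr : List Int) : Prop :=
  arr.sum < 0 ∧ ∃ t ∈ arr,
    arr.filter (fun x => decide (x < t)) ≠ [] ∧
    2 * (arr.filter (fun x => decide (x < t))).sum = arr.sum
instance (arr : List Int) : Decidable (D_balancedSplitExists arr) := by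
  unfold D_balancedSplitExists; infer_instance

def Spec_balancedSplitExists (arr : List Int) (out : Bool) : Prop :=
  ¬ D_balancedSplitExists arr → out = balancedSplitExists_alt arr
instance (arr : List Int) (out : Bool) : Decidable (Spec_balancedSplitExists arr out) := by
  unfold Spec_balancedSplitExists; infer_instance

def pvDiffWitness_balancedSplitExists : List Int := [-3, -2, -1]
def pvDiffWitnessOut_balancedSplitExists : Bool × Bool := (false, true)

-- ===== CLAIM (what is proved, stated in full; the proofs are below) =====
def Claim_unchanged_balancedSplitExists : Prop :=
  ∀ (arr : List Int), Dom_balancedSplitExists arr → Pre_balancedSplitExists arr →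
    Spec_balancedSplitExists arr (balancedSplitExists arr)
def Claim_changed_balancedSplitExists : Prop :=
  Dom_balancedSplitExists (pvDiffWitness_balancedSplitExists) ∧
  Pre_balancedSplitExists (pvDiffWitness_balancedSplitExists) ∧
  D_balancedSplitExists (pvDiffWitness_balancedSplitExists) ∧
  balancedSplitExists (pvDiffWitness_balancedSplitExists) = pvDiffWitnessOut_balancedSplitExists.1 ∧
  balancedSplitExists_alt (pvDiffWitness_balancedSplitExists) = pvDiffWitnessOut_balancedSplitExists.2 ∧
  pvDiffWitnessOut_balancedSplitExists.1 ≠ pvDiffWitnessOut_balancedSplitExists.2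
def Claim_exact_balancedSplitExists : Prop :=
  ∀ (arr : List Int), Dom_balancedSplitExists arr → Pre_balancedSplitExists arr →
    D_balancedSplitExists arr → balancedSplitExists arr ≠ balancedSplitExists_alt arr
-- ===== LEMMAS AND PROOFS =====

-- prefix sums of the sorted list
def pvP (s : List Int) (k : Nat) : Int := (s.take k).sum

-- a split boundary k is valid: equal sums and a strict step between the halves
def pvValid (s : List Int) (k : Nat) : Prop :=
  0 < k ∧ k < s.length ∧ 2 * pvP s k = s.sum ∧ s.getD (k - 1) 0 < s.getD k 0

lemma pvP_succ (s : List Int) (i : Nat) (h : i < s.length) :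
    pvP s (i + 1) = pvP s i + s.getD i 0 := by
  unfold pvP
  rw [List.take_succ, List.sum_append, List.getElem?_eq_getElem h,
    List.getD_eq_getElem s 0 h]
  simp

lemma pvP_length (s : List Int) : pvP s s.length = s.sum := by
  simp [pvP]

lemma pv_mono (s : List Int) (hs : s.Pairwise (· ≤ ·)) (i j : Nat)
    (hij : i ≤ j) (hj : j < s.length) : s.getD i 0 ≤ s.getD j 0 := by
  rcases Nat.lt_or_ge i j with h | h
  · rw [List.getD_eq_getElem s 0 (lt_trans h hj), List.getD_eq_getElem s 0 hj]
    exact List.pairwise_iff_getElem.mp hs i j _ _ h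
  · have : i = j := le_antisymm hij h
    subst this; rfl

lemma pv_lower (s : List Int) (c : Int) (i j : Nat) (hij : i ≤ j) (hj : j ≤ s.length)
    (hc : ∀ t, i ≤ t → t < j → c ≤ s.getD t 0) :
    pvP s i + c * ((j : Int) - (i : Int)) ≤ pvP s j := by
  induction j, hij using Nat.le_induction with
  | base => simp
  | succ j hij ih =>
    have hjn : j < s.length := by omega
    rw [pvP_succ s j hjn]
    have h1 := ih (by omega) (fun t ht htj => hc t ht (by omega))
    have h2 := hc j hij (by omega)
    push_cast
    linarith

lemma pv_upper (s : List Int) (c : Int) (i j : Nat) (hij : i ≤ j) (hj : j ≤ s.length)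
    (hc : ∀ t, i ≤ t → t < j → s.getD t 0 ≤ c) :
    pvP s j ≤ pvP s i + c * ((j : Int) - (i : Int)) := by
  induction j, hij using Nat.le_induction with
  | base => simp
  | succ j hij ih =>
    have hjn : j < s.length := by omega
    rw [pvP_succ s j hjn]
    have h1 := ih (by omega) (fun t ht htj => hc t ht (by omega))
    have h2 := hc j hij (by omega)
    push_cast
    linarith

-- ---- facts about a valid boundary when the total is nonnegative ----

lemma pv_la1 (s : List Int) (hs : s.Pairwise (· ≤ ·)) (k : Nat)
    (hT : 0 ≤ s.sum) (hk : pvValid s k) : 1 ≤ s.getD (k - 1) 0 := by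
  obtain ⟨hk0, hkn, hkeq, hklt⟩ := hk
  by_contra hcon
  push_neg at hcon
  set c := s.getD (k - 1) 0 with hcdef
  have hc : c ≤ 0 := by omega
  -- P k ≤ c * k ≤ 0
  have hup : pvP s k ≤ pvP s 0 + c * ((k : Int) - ((0 : Nat) : Int)) := by
    refine pv_upper s _ 0 k (by omega) (by omega) ?_
    intro t ht htk
    exact pv_mono s hs t (k - 1) (by omega) (by omega)
  have h0 : pvP s 0 = 0 := by simp [pvP]
  rw [h0] at hup
  simp only [Nat.cast_zero, sub_zero, zero_add] at hup
  have hck : c * (k : Int) ≤ 0 :=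
    mul_nonpos_of_nonpos_of_nonneg hc (by positivity)
  have hPk0 : pvP s k = 0 := by omega
  have hT0 : s.sum = 0 := by omega
  have hk1 : (1 : Int) ≤ (k : Int) := by exact_mod_cast hk0
  -- c * k = 0 with k ≥ 1, c ≤ 0 forces c = 0
  have hc0 : c = 0 := by
    by_contra hne
    have hclt : c ≤ -1 := by omega
    have hle : c * (k : Int) ≤ -1 * (k : Int) :=
      mul_le_mul_of_nonneg_right hclt (by positivity)
    omega
  -- then s[k] ≥ 1 and the suffix is positive, contradicting total 0
  have hsk : 1 ≤ s.getD k 0 := by omega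
  have hlow : pvP s k + 1 * ((s.length : Int) - (k : Int)) ≤ pvP s s.length := by
    refine pv_lower s 1 k s.length (by omega) (by omega) ?_
    intro t ht htn
    calc (1 : Int) ≤ s.getD k 0 := hsk
      _ ≤ s.getD t 0 := pv_mono s hs k t ht htn
  rw [pvP_length] at hlow
  have : (k : Int) < (s.length : Int) := by exact_mod_cast hkn
  omega

lemma pv_la2 (s : List Int) (hs : s.Pairwise (· ≤ ·)) (k : Nat)
    (hT : 0 ≤ s.sum) (hk : pvValid s k) :
    ∀ t, k ≤ t → t < s.length → 2 ≤ s.getD t 0 := by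
  intro t hkt htn
  have h1 := pv_la1 s hs k hT hk
  have h2 := hk.2.2.2
  have h3 := pv_mono s hs k t hkt htn
  omega

lemma pv_Tpos (s : List Int) (hs : s.Pairwise (· ≤ ·)) (k : Nat)
    (hT : 0 ≤ s.sum) (hk : pvValid s k) : 0 < s.sum := by
  obtain ⟨hk0, hkn, hkeq, hklt⟩ := hk
  have hlow : pvP s k + 2 * ((s.length : Int) - (k : Int)) ≤ pvP s s.length := by
    refine pv_lower s 2 k s.length (by omega) (by omega) ?_
    intro t ht htn
    exact pv_la2 s hs k hT ⟨hk0, hkn, hkeq, hklt⟩ t ht htn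
  rw [pvP_length] at hlow
  have : (k : Int) < (s.length : Int) := by exact_mod_cast hkn
  omega

-- strict growth of prefix sums left of a valid boundary (total ≥ 0)
lemma pv_la3 (s : List Int) (hs : s.Pairwise (· ≤ ·)) (k : Nat)
    (hT : 0 ≤ s.sum) (hk : pvValid s k) (j : Nat) (hj1 : 1 ≤ j) (hjk : j < k) :
    pvP s j < pvP s k := by
  obtain ⟨hk0, hkn, hkeq, hklt⟩ := hk
  by_contra hcon
  push_neg at hcon
  have hTpos := pv_Tpos s hs k hT ⟨hk0, hkn, hkeq, hklt⟩
  have hPk : 1 ≤ pvP s k := by omega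
  have hPj : 1 ≤ pvP s j := le_trans hPk hcon
  set c := s.getD (j - 1) 0 with hcdef
  -- s[j-1] ≥ 1: j terms each ≤ s[j-1] sum to ≥ 1
  have hup : pvP s j ≤ pvP s 0 + c * ((j : Int) - ((0 : Nat) : Int)) := by
    refine pv_upper s _ 0 j (by omega) (by omega) ?_
    intro t ht htj
    exact pv_mono s hs t (j - 1) (by omega) (by omega)
  have h0 : pvP s 0 = 0 := by simp [pvP]
  rw [h0] at hup
  simp only [Nat.cast_zero, sub_zero, zero_add] at hup
  have hcpos : 1 ≤ c := by
    by_contra hne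
    push_neg at hne
    have hc : c ≤ 0 := by omega
    have : c * (j : Int) ≤ 0 :=
      mul_nonpos_of_nonpos_of_nonneg hc (by positivity)
    omega
  -- then elements of [j, k) are ≥ 1 and P k > P j
  have hlow : pvP s j + 1 * ((k : Int) - (j : Int)) ≤ pvP s k := by
    refine pv_lower s 1 j k (by omega) (by omega) ?_
    intro t ht htk
    calc (1 : Int) ≤ c := hcpos
      _ ≤ s.getD t 0 := pv_mono s hs (j - 1) t (by omega) (by omega)
  have : (j : Int) < (k : Int) := by exact_mod_cast hjk
  omega

-- suffix sums right of a valid boundary are at most half the total (total ≥ 0)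
lemma pv_la4 (s : List Int) (hs : s.Pairwise (· ≤ ·)) (k : Nat)
    (hT : 0 ≤ s.sum) (hk : pvValid s k) (j : Nat) (hkj : k ≤ j) (hjn : j ≤ s.length) :
    s.sum - pvP s j ≤ pvP s k := by
  have hlow : pvP s k + 0 * ((j : Int) - (k : Int)) ≤ pvP s j := by
    refine pv_lower s 0 k j hkj hjn ?_
    intro t ht htj
    have := pv_la2 s hs k hT hk t ht (by omega)
    omega
  have := hk.2.2.1
  omega

-- ---- facts about a valid boundary when the total is negative ----

lemma pv_lb1 (s : List Int) (hs : s.Pairwise (· ≤ ·)) (k : Nat)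
    (hT : s.sum < 0) (hk : pvValid s k) : s.getD k 0 ≤ -1 := by
  obtain ⟨hk0, hkn, hkeq, hklt⟩ := hk
  by_contra hcon
  push_neg at hcon
  have hnn : 0 ≤ s.getD k 0 := by omega
  have hlow : pvP s k + 0 * ((s.length : Int) - (k : Int)) ≤ pvP s s.length := by
    refine pv_lower s 0 k s.length (by omega) (by omega) ?_
    intro t ht htn
    have := pv_mono s hs k t ht htn
    omega
  rw [pvP_length] at hlow
  omega

lemma pv_lb2 (s : List Int) (hs : s.Pairwise (· ≤ ·)) (k : Nat)
    (hT : s.sum < 0) (hk : pvValid s k) : s.getD (k - 1) 0 ≤ -2 := by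
  have h1 := pv_lb1 s hs k hT hk
  have h2 := hk.2.2.2
  omega

-- uniqueness of the valid boundary when the total is negative
lemma pv_uniq_aux (s : List Int) (hs : s.Pairwise (· ≤ ·)) (k m : Nat)
    (hT : s.sum < 0) (hk : pvValid s k) (hm : pvValid s m) (hmk : m < k) : False := by
  obtain ⟨hk0, hkn, hkeq, hklt⟩ := hk
  obtain ⟨hm0, hmn, hmeq, hmlt⟩ := hm
  have heq : pvP s m = pvP s k := by omega
  have hup : pvP s k ≤ pvP s m + (-1) * ((k : Int) - (m : Int)) := by
    refine pv_upper s (-1) m k (by omega) (by omega) ?_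
    intro t ht htk
    have h1 := pv_lb2 s hs k hT ⟨hk0, hkn, hkeq, hklt⟩
    have h2 := pv_mono s hs t (k - 1) (by omega) (by omega)
    omega
  have hmk' : (m : Int) < (k : Int) := by exact_mod_cast hmk
  omega

lemma pv_uniq (s : List Int) (hs : s.Pairwise (· ≤ ·)) (k m : Nat)
    (hT : s.sum < 0) (hk : pvValid s k) (hm : pvValid s m) : m = k := by
  rcases Nat.lt_trichotomy m k with h | h | h
  · exact absurd (pv_uniq_aux s hs k m hT hk hm h) (fun f => f)
  · exact h
  · exact absurd (pv_uniq_aux s hs m k hT hm hk h) (fun f => f)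

-- ---- trajectory lemmas for A's loop ----

lemma goA_stop (s : List Int) (fuel l r : Nat) (sl sr : Int) (h : ¬ l + 1 < r) :
    goA s fuel l r sl sr = (l, r, sl, sr) := by
  cases fuel <;> simp [goA, h]

-- generic final shape: the loop ends with adjacent pointers carrying prefix/suffix sums
lemma goA_shape (s : List Int) :
    ∀ d l r, r - l ≤ d → l + 1 ≤ r → r < s.length →
      ∃ m, l < m ∧ m ≤ r ∧
        goA s d l r (pvP s (l + 1)) (s.sum - pvP s r) =
          (m - 1, m, pvP s m, s.sum - pvP s m) := by
  intro d
  induction d with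
  | zero => intro l r hd h1 h2; omega
  | succ d ih =>
    intro l r hd h1 h2
    simp only [goA]
    by_cases hlr : l + 1 < r
    · simp only [hlr, if_true]
      by_cases hc : pvP s (l + 1) < s.sum - pvP s r
      · simp only [hc, if_true]
        rw [← pvP_succ s (l + 1) (by omega)]
        obtain ⟨m, hm1, hm2, hm3⟩ := ih (l + 1) r (by omega) (by omega) h2
        exact ⟨m, by omega, hm2, hm3⟩
      · simp only [hc, if_false]
        have hr : s.sum - pvP s r + s.getD (r - 1) 0 = s.sum - pvP s (r - 1) := by
          have := pvP_succ s (r - 1) (by omega)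
          have hrr : r - 1 + 1 = r := by omega
          rw [hrr] at this
          omega
        rw [hr]
        obtain ⟨m, hm1, hm2, hm3⟩ := ih l (r - 1) (by omega) (by omega) (by omega)
        exact ⟨m, hm1, by omega, hm3⟩
    · simp only [hlr, if_false]
      refine ⟨r, by omega, le_refl r, ?_⟩
      have h4 : l + 1 = r := by omega
      have h5 : l = r - 1 := by omega
      rw [h4, h5]

-- total ≥ 0: the loop is attracted to the unique valid boundary
lemma goA_attract (s : List Int) (hs : s.Pairwise (· ≤ ·)) (k : Nat)
    (hT : 0 ≤ s.sum) (hk : pvValid s k) :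
    ∀ d l r, r - l ≤ d → l + 1 ≤ k → k ≤ r → r < s.length →
      goA s d l r (pvP s (l + 1)) (s.sum - pvP s r) =
        (k - 1, k, pvP s k, s.sum - pvP s k) := by
  intro d
  induction d with
  | zero => intro l r hd h1 h2 h3; omega
  | succ d ih =>
    intro l r hd h1 h2 h3
    simp only [goA]
    by_cases hlr : l + 1 < r
    · simp only [hlr, if_true]
      by_cases hc : pvP s (l + 1) < s.sum - pvP s r
      · simp only [hc, if_true]
        have hlk : l + 1 < k := by
          rcases Nat.lt_or_ge (l + 1) k with h | h
          · exact h
          · exfalso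
            have : l + 1 = k := by omega
            subst this
            have := pv_la4 s hs (l + 1) hT hk r h2 (by omega)
            omega
        rw [← pvP_succ s (l + 1) (by omega)]
        exact ih (l + 1) r (by omega) (by omega) h2 h3
      · simp only [hc, if_false]
        have hkr : k < r := by
          rcases Nat.lt_or_ge k r with h | h
          · exact h
          · exfalso
            have hrk : r = k := by omega
            subst hrk
            have hj : pvP s (l + 1) < pvP s r := pv_la3 s hs r hT hk (l + 1) (by omega) (by omega)
            have := hk.2.2.1
            omega
        have hr : s.sum - pvP s r + s.getD (r - 1) 0 = s.sum - pvP s (r - 1) := by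
          have := pvP_succ s (r - 1) (by omega)
          have hrr : r - 1 + 1 = r := by omega
          rw [hrr] at this
          omega
        rw [hr]
        exact ih l (r - 1) (by omega) h1 (by omega) (by omega)
    · simp only [hlr, if_false]
      have h4 : l + 1 = k := by omega
      have h5 : l = k - 1 := by omega
      have h6 : r = k := by omega
      rw [h4, h6, h5]

-- total < 0: the loop never ends exactly at the valid boundary
lemma goA_repel (s : List Int) (hs : s.Pairwise (· ≤ ·)) (k : Nat)
    (hT : s.sum < 0) (hk : pvValid s k) :
    ∀ d l r, r - l ≤ d → l + 1 ≤ r → r < s.length → ¬(l + 1 = k ∧ r = k) →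
      ∃ m, l < m ∧ m ≤ r ∧ m ≠ k ∧
        goA s d l r (pvP s (l + 1)) (s.sum - pvP s r) =
          (m - 1, m, pvP s m, s.sum - pvP s m) := by
  intro d
  induction d with
  | zero => intro l r hd h1 h2 h3; omega
  | succ d ih =>
    intro l r hd h1 h2 h3
    simp only [goA]
    by_cases hlr : l + 1 < r
    · simp only [hlr, if_true]
      by_cases hc : pvP s (l + 1) < s.sum - pvP s r
      · simp only [hc, if_true]
        have hblock : ¬(l + 1 + 1 = k ∧ r = k) := by
          rintro ⟨hl2, hrk⟩
          -- current state is (k-2, k): sl = P(k-1) > P k = sr, contradicting sl < sr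
          subst hrk
          have hl1 : l + 1 = r - 1 := by omega
          have hPs : pvP s r = pvP s (r - 1) + s.getD (r - 1) 0 := by
            have := pvP_succ s (r - 1) (by omega)
            have hrr : r - 1 + 1 = r := by omega
            rw [hrr] at this; exact this
          have hneg := pv_lb2 s hs r hT hk
          have heq := hk.2.2.1
          rw [hl1] at hc
          omega
        rw [← pvP_succ s (l + 1) (by omega)]
        obtain ⟨m, hm1, hm2, hm3, hm4⟩ := ih (l + 1) r (by omega) (by omega) h2 hblock
        exact ⟨m, by omega, hm2, hm3, hm4⟩
      · simp only [hc, if_false]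
        have hblock : ¬(l + 1 = k ∧ r - 1 = k) := by
          rintro ⟨hl1, hrk⟩
          -- current state is (k-1, k+1): sr = P k - s[k] > P k = sl, contradicting ¬(sl < sr)
          have hrk1 : r = k + 1 := by omega
          subst hrk1
          have hPs : pvP s (k + 1) = pvP s k + s.getD k 0 := pvP_succ s k (by omega)
          have hneg := pv_lb1 s hs k hT hk
          have heq := hk.2.2.1
          rw [hl1] at hc
          omega
        have hr : s.sum - pvP s r + s.getD (r - 1) 0 = s.sum - pvP s (r - 1) := by
          have := pvP_succ s (r - 1) (by omega)
          have hrr : r - 1 + 1 = r := by omega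
          rw [hrr] at this
          omega
        rw [hr]
        obtain ⟨m, hm1, hm2, hm3, hm4⟩ := ih l (r - 1) (by omega) (by omega) (by omega) hblock
        exact ⟨m, hm1, by omega, hm3, hm4⟩
    · simp only [hlr, if_false]
      refine ⟨r, by omega, le_refl r, ?_, ?_⟩
      · intro hrk
        exact h3 ⟨by omega, hrk⟩
      · have h4 : l + 1 = r := by omega
        have h5 : l = r - 1 := by omega
        rw [h4, h5]

-- ---- B's scan is the existence test ----

lemma goB_iff (s : List Int) :
    ∀ d i, s.length - i ≤ d →
      (goB s s.sum d i (pvP s i) = true ↔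
        ∃ m, i < m ∧ m < s.length ∧ 2 * pvP s m = s.sum ∧
          s.getD (m - 1) 0 < s.getD m 0) := by
  intro d
  induction d with
  | zero =>
    intro i hd
    simp only [goB]
    constructor
    · intro h; exact absurd h (by simp)
    · rintro ⟨m, hm1, hm2, _⟩; omega
  | succ d ih =>
    intro i hd
    simp only [goB]
    by_cases hi : i + 1 < s.length
    · simp only [hi, if_true]
      rw [← pvP_succ s i (by omega)]
      by_cases hc : 2 * pvP s (i + 1) = s.sum ∧ s.getD i 0 < s.getD (i + 1) 0
      · simp only [hc]
        constructor
        · intro _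
          exact ⟨i + 1, by omega, hi, hc.1, by simpa using hc.2⟩
        · intro _; rfl
      · simp only [hc, if_false]
        rw [ih (i + 1) (by omega)]
        constructor
        · rintro ⟨m, hm1, hm2, hm3, hm4⟩
          exact ⟨m, by omega, hm2, hm3, hm4⟩
        · rintro ⟨m, hm1, hm2, hm3, hm4⟩
          refine ⟨m, ?_, hm2, hm3, hm4⟩
          rcases Nat.lt_or_ge (i + 1) m with h | h
          · exact h
          · exfalso
            have hmi : m = i + 1 := by omega
            subst hmi
            simp at hm4
            exact hc ⟨hm3, hm4⟩
    · simp only [hi, if_false]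
      constructor
      · intro h; exact absurd h (by simp)
      · rintro ⟨m, hm1, hm2, _⟩; omega

lemma alt_iff (arr : List Int) :
    balancedSplitExists_alt arr = true ↔
      ∃ m, pvValid (PySem.List.sorted arr (fun x => x) false) m := by
  unfold balancedSplitExists_alt
  have h0 : pvP (PySem.List.sorted arr (fun x => x) false) 0 = 0 := by simp [pvP]
  rw [← h0, goB_iff _ (PySem.List.sorted arr (fun x => x) false).length 0 (by omega)]
  unfold pvValid
  constructor
  · rintro ⟨m, h1, h2, h3, h4⟩; exact ⟨m, h1, h2, h3, h4⟩
  · rintro ⟨m, h1, h2, h3, h4⟩; exact ⟨m, h1, h2, h3, h4⟩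

-- ---- bridging D_ to pvValid: on a sorted list, filtering below a threshold is a prefix ----

lemma pv_filter_take (t : Int) : ∀ (s : List Int), s.Pairwise (· ≤ ·) →
    s.filter (fun x => decide (x < t)) = s.take (s.countP (fun x => decide (x < t)))
  | [], _ => rfl
  | x :: xs, h => by
    obtain ⟨hx, hxs⟩ := List.pairwise_cons.mp h
    by_cases hxt : x < t
    · simp only [List.filter_cons, List.countP_cons, hxt, decide_true, if_true, cond_true]
      rw [List.take_succ_cons, ← pv_filter_take t xs hxs]
    · have h0 : xs.countP (fun x => decide (x < t)) = 0 :=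
        List.countP_eq_zero.mpr (fun a ha => by
          simp only [decide_eq_true_eq]
          have := hx a ha
          omega)
      have hf : xs.filter (fun x => decide (x < t)) = [] :=
        List.filter_eq_nil_iff.mpr (fun a ha => by
          simp only [decide_eq_true_eq]
          have := hx a ha
          omega)
      simp [List.filter_cons, List.countP_cons, hxt, h0, hf]

lemma pv_side1 (s : List Int) (t : Int) (i : Nat) (hs : s.Pairwise (· ≤ ·))
    (hi : i < s.countP (fun x => decide (x < t))) : s.getD i 0 < t := by
  have hk : s.countP (fun x => decide (x < t)) ≤ s.length := List.countP_le_length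
  have hil : i < s.length := by omega
  have hpf := pv_filter_take t s hs
  have hmem : s.getD i 0 ∈ s.filter (fun x => decide (x < t)) := by
    rw [hpf, List.getD_eq_getElem s 0 hil]
    have hlen : i < (s.take (s.countP (fun x => decide (x < t)))).length := by
      simp only [List.length_take]
      omega
    have hgt : (s.take (s.countP (fun x => decide (x < t))))[i]'hlen = s[i]'hil :=
      List.getElem_take
    rw [← hgt]
    exact List.getElem_mem hlen
  simpa using List.of_mem_filter hmem

lemma pv_side2 (s : List Int) (t : Int) (i : Nat) (hs : s.Pairwise (· ≤ ·))
    (hki : s.countP (fun x => decide (x < t)) ≤ i) (hil : i < s.length) :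
    t ≤ s.getD i 0 := by
  set k := s.countP (fun x => decide (x < t)) with hkdef
  have hpf := pv_filter_take t s hs
  have hsplit : s.countP (fun x => decide (x < t)) =
      (s.take k).countP (fun x => decide (x < t)) +
      (s.drop k).countP (fun x => decide (x < t)) := by
    conv_lhs => rw [← List.take_append_drop k s]
    rw [List.countP_append]
  have htake : (s.take k).countP (fun x => decide (x < t)) = k := by
    rw [← hpf]
    have h1 : (s.filter (fun x => decide (x < t))).countP (fun x => decide (x < t)) =
        (s.filter (fun x => decide (x < t))).length :=
      List.countP_eq_length.mpr (fun a ha => by simpa using List.of_mem_filter ha)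
    rw [h1]
    exact (List.countP_eq_length_filter ..).symm
  have hdrop : (s.drop k).countP (fun x => decide (x < t)) = 0 := by omega
  have hmem : s.getD i 0 ∈ s.drop k := by
    rw [List.getD_eq_getElem s 0 hil]
    have hlen : i - k < (s.drop k).length := by
      simp only [List.length_drop]
      omega
    have hgt : (s.drop k)[i - k]'hlen = s[k + (i - k)]'(by omega) := List.getElem_drop ..
    have heq : s[k + (i - k)]'(by omega) = s[i]'hil := by
      congr 1
      omega
    have hmem2 := List.getElem_mem hlen
    rw [hgt, heq] at hmem2
    exact hmem2
  have := List.countP_eq_zero.mp hdrop _ hmem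
  simpa using this

lemma D_iff (arr : List Int) :
    D_balancedSplitExists arr ↔
      (PySem.List.sorted arr (fun x => x) false).sum < 0 ∧
      ∃ m, pvValid (PySem.List.sorted arr (fun x => x) false) m := by
  set s := PySem.List.sorted arr (fun x => x) false with hsdef
  have hs : s.Pairwise (· ≤ ·) := PySem.List.sorted_pairwise arr (fun x => x)
  have hperm : s.Perm arr := PySem.List.sorted_perm arr (fun x => x) false
  have hsum : s.sum = arr.sum := hperm.sum_eq
  unfold D_balancedSplitExists
  constructor
  · rintro ⟨h1, t, ht, hne, h2⟩
    set k := s.countP (fun x => decide (x < t)) with hkdef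
    have hkle : k ≤ s.length := List.countP_le_length
    have hcnt : k = (arr.filter (fun x => decide (x < t))).length := by
      rw [hkdef, hperm.countP_eq]
      exact List.countP_eq_length_filter ..
    have hk0 : 0 < k := by
      rcases Nat.eq_zero_or_pos k with h | h
      · exfalso
        apply hne
        rw [← List.length_eq_zero_iff]
        omega
      · exact h
    have hkn : k < s.length := by
      rcases Nat.lt_or_ge k s.length with h | h
      · exact h
      · exfalso
        have hts : t ∈ s := hperm.mem_iff.mpr ht
        have hkeq2 : s.countP (fun x => decide (x < t)) = s.length := by omega
        have hall := List.countP_eq_length.mp hkeq2 t hts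
        simp at hall
    have hpf := pv_filter_take t s hs
    have hfp : (s.filter (fun x => decide (x < t))).Perm
        (arr.filter (fun x => decide (x < t))) := hperm.filter _
    have hPk : pvP s k = (arr.filter (fun x => decide (x < t))).sum := by
      rw [pvP, hkdef, ← hpf]
      exact hfp.sum_eq
    refine ⟨by omega, k, hk0, hkn, by omega, ?_⟩
    have hlt1 : s.getD (k - 1) 0 < t := pv_side1 s t (k - 1) hs (by omega)
    have hlt2 : t ≤ s.getD k 0 := pv_side2 s t k hs (by omega) hkn
    omega
  · rintro ⟨h1, m, hm0, hmn, hmeq, hmlt⟩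
    set t := s.getD m 0 with htdef
    have hcnt : s.countP (fun x => decide (x < t)) = m := by
      have hcle : s.countP (fun x => decide (x < t)) ≤ s.length := List.countP_le_length
      rcases Nat.lt_trichotomy (s.countP (fun x => decide (x < t))) m with h | h | h
      · exfalso
        have h2 := pv_side2 s t (s.countP (fun x => decide (x < t))) hs
          (le_refl _) (by omega)
        have h3 := pv_mono s hs (s.countP (fun x => decide (x < t))) (m - 1)
          (by omega) (by omega)
        omega
      · exact h
      · exfalso
        have h2 := pv_side1 s t m hs (by omega)
        omega
    refine ⟨by omega, t, ?_, ?_, ?_⟩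
    · have hts : t ∈ s := by
        rw [htdef, List.getD_eq_getElem s 0 hmn]
        exact List.getElem_mem hmn
      exact hperm.mem_iff.mp hts
    · intro hnil
      have hl0 : (arr.filter (fun x => decide (x < t))).length = 0 := by
        rw [hnil]
        rfl
      have hc2 : arr.countP (fun x => decide (x < t)) = 0 := by
        rw [List.countP_eq_length_filter]
        omega
      have := hperm.countP_eq (fun x => decide (x < t))
      omega
    · have hpf := pv_filter_take t s hs
      have hfp := hperm.filter (fun x => decide (x < t))
      have hsum2 : (arr.filter (fun x => decide (x < t))).sum = pvP s m := by
        rw [← hfp.sum_eq, hpf, hcnt, pvP]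
      omega

-- ---- evaluating A's port through the trajectory lemmas ----

lemma pv_e1 (s : List Int) (h : 0 < s.length) : s.getD 0 0 = pvP s 1 := by
  have h1 : pvP s 1 = pvP s 0 + s.getD 0 0 := pvP_succ s 0 h
  have h0 : pvP s 0 = 0 := rfl
  omega

lemma pv_e2 (s : List Int) (h : 0 < s.length) :
    s.getD (s.length - 1) 0 = s.sum - pvP s (s.length - 1) := by
  have h1 := pvP_succ s (s.length - 1) (by omega)
  have hl : s.length - 1 + 1 = s.length := by omega
  rw [hl] at h1
  have h2 := pvP_length s
  omega

lemma A_true (arr : List Int) (h : arr ≠ []) (k : Nat)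
    (hT : 0 ≤ (PySem.List.sorted arr (fun x => x) false).sum)
    (hk : pvValid (PySem.List.sorted arr (fun x => x) false) k) :
    balancedSplitExists arr = true := by
  set s := PySem.List.sorted arr (fun x => x) false with hsdef
  have hs : s.Pairwise (· ≤ ·) := PySem.List.sorted_pairwise arr (fun x => x)
  have hne : s ≠ [] := by simpa [hsdef, PySem.List.sorted_eq_nil_iff] using h
  have hlen : 0 < s.length := List.length_pos_of_ne_nil hne
  obtain ⟨hk0, hkn, hkeq, hklt⟩ := hk
  have hres := goA_attract s hs k hT ⟨hk0, hkn, hkeq, hklt⟩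
    s.length 0 (s.length - 1) (by omega) (by omega) (by omega) (by omega)
  show pvCheck s (goA s s.length 0 (s.length - 1) (s.getD 0 0) (s.getD (s.length - 1) 0)) = true
  rw [pv_e1 s hlen, pv_e2 s hlen, hres]
  unfold pvCheck
  have heq2 : s.sum - pvP s k = pvP s k := by omega
  rw [heq2]
  simp only [Bool.and_eq_true, decide_eq_true_eq]
  exact ⟨trivial, hklt⟩

lemma A_false_none (arr : List Int) (h : arr ≠ [])
    (hnv : ¬ ∃ m, pvValid (PySem.List.sorted arr (fun x => x) false) m) :
    balancedSplitExists arr = false := by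
  set s := PySem.List.sorted arr (fun x => x) false with hsdef
  have hne : s ≠ [] := by simpa [hsdef, PySem.List.sorted_eq_nil_iff] using h
  have hlen : 0 < s.length := List.length_pos_of_ne_nil hne
  show pvCheck s (goA s s.length 0 (s.length - 1) (s.getD 0 0) (s.getD (s.length - 1) 0)) = false
  by_cases hone : s.length = 1
  · rw [goA_stop s _ _ _ _ _ (by omega)]
    simp [pvCheck, hone]
  · obtain ⟨m, hm1, hm2, hm3⟩ := goA_shape s s.length 0 (s.length - 1)
      (by omega) (by omega) (by omega)
    rw [pv_e1 s hlen, pv_e2 s hlen, hm3]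
    unfold pvCheck
    by_contra hcon
    simp only [Bool.and_eq_true, decide_eq_true_eq, Bool.not_eq_false] at hcon
    exact hnv ⟨m, by omega, by omega, by omega, hcon.2⟩

lemma A_false_neg (arr : List Int) (h : arr ≠ []) (k : Nat)
    (hT : (PySem.List.sorted arr (fun x => x) false).sum < 0)
    (hk : pvValid (PySem.List.sorted arr (fun x => x) false) k) :
    balancedSplitExists arr = false := by
  set s := PySem.List.sorted arr (fun x => x) false with hsdef
  have hs : s.Pairwise (· ≤ ·) := PySem.List.sorted_pairwise arr (fun x => x)
  have hne : s ≠ [] := by simpa [hsdef, PySem.List.sorted_eq_nil_iff] using h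
  have hlen : 0 < s.length := List.length_pos_of_ne_nil hne
  obtain ⟨hk0, hkn, hkeq, hklt⟩ := hk
  have hinit : ¬(0 + 1 = k ∧ s.length - 1 = k) := by
    rintro ⟨h1, h2⟩
    -- k = 1 and n = 2: 2*s[0] = s[0]+s[1] forces s[0] = s[1], contradicting s[0] < s[1]
    have hk1 : k = 1 := by omega
    subst hk1
    have hn2 : s.length = 2 := by omega
    have h00 : pvP s 0 = 0 := rfl
    have hP1 : pvP s 1 = pvP s 0 + s.getD 0 0 := pvP_succ s 0 (by omega)
    have hP2 : pvP s 2 = pvP s 1 + s.getD 1 0 := pvP_succ s 1 (by omega)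
    have hsum : pvP s 2 = s.sum := by rw [← hn2, pvP_length]
    have hklt' : s.getD 0 0 < s.getD 1 0 := hklt
    omega
  obtain ⟨m, hm1, hm2, hm3, hm4⟩ := goA_repel s hs k hT ⟨hk0, hkn, hkeq, hklt⟩
    s.length 0 (s.length - 1) (by omega) (by omega) (by omega) hinit
  show pvCheck s (goA s s.length 0 (s.length - 1) (s.getD 0 0) (s.getD (s.length - 1) 0)) = false
  rw [pv_e1 s hlen, pv_e2 s hlen, hm4]
  unfold pvCheck
  by_contra hcon
  simp only [Bool.and_eq_true, decide_eq_true_eq, Bool.not_eq_false] at hcon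
  have hmv : pvValid s m := ⟨by omega, by omega, by omega, hcon.2⟩
  exact hm3 (pv_uniq s hs k m hT ⟨hk0, hkn, hkeq, hklt⟩ hmv)

-- ===== VERDICT (by name: the statement is the Claim_ definition above) =====
theorem balancedSplitExists_spec : Claim_unchanged_balancedSplitExists := by
  intro arr _hdom hpre hnd
  set s := PySem.List.sorted arr (fun x => x) false with hsdef
  by_cases hv : ∃ m, pvValid s m
  · obtain ⟨k, hk⟩ := hv
    by_cases hT : 0 ≤ s.sum
    · rw [A_true arr hpre k hT hk, eq_comm, alt_iff]
      exact ⟨k, hk⟩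
    · exfalso
      refine hnd ((D_iff arr).mpr ⟨?_, k, hk⟩)
      rw [← hsdef]
      omega
  · rw [A_false_none arr hpre hv]
    rw [eq_comm]
    rw [← Bool.not_eq_true, alt_iff]
    exact hv

theorem balancedSplitExists_changed : Claim_changed_balancedSplitExists := by
  unfold Claim_changed_balancedSplitExists; decide

theorem balancedSplitExists_tight : Claim_exact_balancedSplitExists := by
  intro arr _hdom hpre hd
  obtain ⟨hT, k, hk⟩ := (D_iff arr).mp hd
  rw [A_false_neg arr hpre k hT hk, (alt_iff arr).mpr ⟨k, hk⟩]
  simp
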